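-- pv_equiv track=rewrite | github.com/TaishoPharmaceutical/MolDesignPlatform | FragmentAE/FragmentAPI.py | get_smiles_val
-- ===== SOURCE A (Python) =====
-- import itertools
--
-- def get_smiles_val(smiles):
--     wc = smiles.count("*")
--     if wc==1:
--         smiles = smiles.replace("*", "[1*]")
--         return [smiles]
--
--     rand = itertools.permutations(range(1,wc+1), wc)
--
--     smis = []
--     count = 0
--     for idx in rand:
--         smis.append(get_smiles_val_core(smiles, idx))
--
--     return smis
--
-- def get_smiles_val_core(smiles, idx):
--     smi = ""
--     count = 0
--     for x in smiles:
--         if x == "*":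
--             smi =smi + f"[{idx[count]}*]"
--             count +=1
--         else:
--             smi =smi + x
--
--     return smi
-- ===== SOURCE B (Python) =====
-- import itertools
--
-- def get_smiles_val(smiles):
--     parts = smiles.split("*")
--     wc = len(parts) - 1
--     out = []
--     for idx in itertools.permutations(range(1, wc + 1)):
--         pieces = [parts[0]]
--         for k, part in zip(idx, parts[1:]):
--             pieces.append(f"[{k}*]")
--             pieces.append(part)
--         out.append("".join(pieces))
--     return out
-- ===== Notes on version B (the rewrite author's own statement) =====
-- stated objective: faster
-- what changed: B splits the string on the wildcard character once and, for each permutation of labels, assembles the result by joining the precomputed pieces with the bracketed labels, instead of A's per-permutation character-by-character rescan with repeated string concatenation; A's single-wildcard special case disappears because the general permutation path already produces the same value.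
import Mathlib
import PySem

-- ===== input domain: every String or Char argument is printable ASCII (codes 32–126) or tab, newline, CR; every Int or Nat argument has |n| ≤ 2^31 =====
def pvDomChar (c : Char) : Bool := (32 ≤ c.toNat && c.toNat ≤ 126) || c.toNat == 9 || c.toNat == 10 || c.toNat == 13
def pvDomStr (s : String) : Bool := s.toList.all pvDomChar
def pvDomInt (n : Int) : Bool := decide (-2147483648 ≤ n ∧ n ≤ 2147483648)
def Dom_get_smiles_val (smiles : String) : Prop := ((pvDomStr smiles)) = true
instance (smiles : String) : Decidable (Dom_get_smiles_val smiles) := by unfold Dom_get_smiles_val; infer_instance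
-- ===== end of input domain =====

-- B splits the string on '*' once and joins the precomputed pieces per permutation, instead of
-- A's per-permutation character-by-character rescan with repeated string concatenation.

-- ===== PORT A =====
-- f"[{k}*]" as a char list
def pvBrk (k : Int) : List Char := '[' :: PySem.Int.toChars k ++ ['*', ']']

-- get_smiles_val_core: character loop with a running (smi, count) state.
-- idx[count] is always in range (count stays below the number of '*' = idx's length),
-- so pyGetD with default 0 is exact there.
def get_smiles_val_core (smiles : String) (idx : List Int) : String :=
  let r := smiles.toList.foldl
    (fun (st : List Char × Int) x =>
      if x = '*' then (st.1 ++ pvBrk (PySem.List.pyGetD idx st.2 0), st.2 + 1)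
      else (st.1 ++ [x], st.2))
    ([], 0)
  String.ofList r.1

def get_smiles_val (smiles : String) : List String :=
  let wc := PySem.Str.count smiles "*"
  if wc == 1 then [PySem.Str.replace smiles "*" "[1*]"]
  else
    let rand := PySem.List.permutations (PySem.List.pyRange 1 ((wc : Int) + 1) 1) wc
    rand.foldl (fun smis idx => smis ++ [get_smiles_val_core smiles idx]) []

-- ===== PORT B =====
def get_smiles_val_alt (smiles : String) : List String :=
  let parts := (PySem.Chars.splitOn smiles.toList ['*']).map String.ofList  -- smiles.split("*")
  let wc := parts.length - 1
  let rng := PySem.List.pyRange 1 ((wc : Int) + 1) 1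
  (PySem.List.permutations rng rng.length).foldl
    (fun out idx =>
      -- parts[0] never raises: split always returns at least one piece, so headD is exact
      let pieces := (idx.zip parts.tail).foldl
        (fun pc kp => pc ++ [String.ofList (pvBrk kp.1), kp.2]) [parts.headD ""]
      out ++ [PySem.Str.join "" pieces]) []

-- ===== PRECONDITION & SPEC =====
def Spec_get_smiles_val (smiles : String) (out : List String) : Prop := out = get_smiles_val_alt smiles
instance (smiles : String) (out : List String) : Decidable (Spec_get_smiles_val smiles out) := by unfold Spec_get_smiles_val; infer_instance

-- ===== CLAIM (what is proved, stated in full; the proofs are below) =====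
def Claim_equal_get_smiles_val : Prop := ∀ (smiles : String), Dom_get_smiles_val smiles → Spec_get_smiles_val smiles (get_smiles_val smiles)

-- ===== LEMMAS AND PROOFS =====

-- split of a char list at '*' (proof-side model of both programs' decompositions)
def pvSplitStar : List Char → List (List Char)
  | [] => [[]]
  | c :: cs =>
    if c = '*' then [] :: pvSplitStar cs
    else
      match pvSplitStar cs with
      | [] => [[c]]
      | p :: ps => (c :: p) :: ps

-- interleave pieces with bracketed labels
def pvInter : List (List Char) → List Int → List Char
  | [], _ => []
  | [p], _ => p
  | p :: ps, [] => p ++ pvInter ps []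
  | p :: ps, k :: ks => p ++ pvBrk k ++ pvInter ps ks

-- what str.replace does between the split pieces
def pvJoinWith : List (List Char) → List Char → List Char
  | [], _ => []
  | [p], _ => p
  | p :: ps, new => p ++ new ++ pvJoinWith ps new

theorem pvSplitStar_ne_nil (cs : List Char) : pvSplitStar cs ≠ [] := by
  cases cs with
  | nil => simp [pvSplitStar]
  | cons c cs =>
    simp only [pvSplitStar]
    split
    · simp
    · split <;> simp

theorem pvSplitStar_length (cs : List Char) :
    (pvSplitStar cs).length = cs.count '*' + 1 := by
  induction cs with
  | nil => simp [pvSplitStar]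
  | cons c cs ih =>
    simp only [pvSplitStar]
    by_cases hc : c = '*'
    · simp [hc, ih]
    · cases hps : pvSplitStar cs with
      | nil => exact absurd hps (pvSplitStar_ne_nil cs)
      | cons p ps =>
        simp [hc, hps] at ih ⊢
        simpa [List.count_cons, hc] using ih

theorem pv_count_go (fuel : Nat) (l : List Char) (acc : Nat) (h : l.length ≤ fuel) :
    PySem.Chars.count.go ['*'] fuel l acc = acc + l.count '*' := by
  induction fuel generalizing l acc with
  | zero =>
    have : l = [] := List.eq_nil_of_length_eq_zero (Nat.le_zero.mp h)
    subst this; simp [PySem.Chars.count.go]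
  | succ fuel ih =>
    cases l with
    | nil => simp [PySem.Chars.count.go]
    | cons c rest =>
      simp only [PySem.Chars.count.go]
      by_cases hc : c = '*'
      · subst hc
        rw [if_pos (by simp [List.isPrefixOf])]
        simp only [List.length_cons] at h
        simp only [List.length_cons, List.length_nil, List.drop_succ_cons, List.drop_zero]
        rw [ih rest (acc + 1) (by omega)]
        simp
        omega
      · rw [if_neg (by simp [List.isPrefixOf]; intro hh; exact hc hh.symm)]
        simp only [List.length_cons] at h
        rw [ih rest acc (by omega)]
        simp [hc]

theorem pv_count_star (s : String) :
    PySem.Str.count s "*" = s.toList.count '*' := by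
  have : PySem.Chars.count s.toList ['*'] = s.toList.count '*' := by
    simp only [PySem.Chars.count]
    rw [if_neg (by simp)]
    simpa using pv_count_go s.toList.length s.toList 0 (le_refl _)
  simpa [PySem.Str.count, PySem.Chars.count] using this

-- splitOn.go at a single-char separator computes pvSplitStar
theorem pv_split_go (fuel : Nat) (l cur : List Char) (acc : List (List Char))
    (h : l.length < fuel) :
    PySem.Chars.splitOn.go ['*'] fuel l cur acc =
      acc.reverse ++
        (match pvSplitStar l with
         | [] => [cur.reverse]
         | p :: ps => (cur.reverse ++ p) :: ps) := by
  induction fuel generalizing l cur acc with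
  | zero => omega
  | succ fuel ih =>
    cases l with
    | nil => simp [PySem.Chars.splitOn.go, pvSplitStar]
    | cons c rest =>
      simp only [PySem.Chars.splitOn.go]
      by_cases hc : c = '*'
      · subst hc
        rw [if_pos (by simp [List.isPrefixOf])]
        simp only [List.length_cons] at h
        simp only [List.length_cons, List.length_nil, List.drop_succ_cons, List.drop_zero]
        rw [ih rest [] (cur.reverse :: acc) (by omega)]
        cases hps : pvSplitStar rest with
        | nil => exact absurd hps (pvSplitStar_ne_nil rest)
        | cons p ps => simp [pvSplitStar, hps]
      · rw [if_neg (by simp [List.isPrefixOf]; intro hh; exact hc hh.symm)]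
        simp only [List.length_cons] at h
        rw [ih rest (c :: cur) acc (by omega)]
        cases hps : pvSplitStar rest with
        | nil => exact absurd hps (pvSplitStar_ne_nil rest)
        | cons p ps => simp [pvSplitStar, hc, hps]

theorem pv_splitOn_star (cs : List Char) :
    PySem.Chars.splitOn cs ['*'] = pvSplitStar cs := by
  simp only [PySem.Chars.splitOn]
  rw [pv_split_go (cs.length + 1) cs [] [] (by omega)]
  cases hps : pvSplitStar cs with
  | nil => exact absurd hps (pvSplitStar_ne_nil cs)
  | cons p ps => simp

-- A's character loop computes the interleaving of the '*'-split pieces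
theorem pv_coreA_fold (idx : List Int) (cs : List Char) (acc : List Char) (n : Nat)
    (h : n + cs.count '*' ≤ idx.length) :
    cs.foldl
      (fun (st : List Char × Int) x =>
        if x = '*' then (st.1 ++ pvBrk (PySem.List.pyGetD idx st.2 0), st.2 + 1)
        else (st.1 ++ [x], st.2))
      (acc, (n : Int)) =
      (acc ++ pvInter (pvSplitStar cs) (idx.drop n), (n : Int) + cs.count '*') := by
  induction cs generalizing acc n with
  | nil => simp [pvSplitStar, pvInter]
  | cons c cs ih =>
    by_cases hc : c = '*'
    · subst hc
      simp only [List.count_cons_self] at h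
      have hn : n < idx.length := by omega
      simp only [List.foldl_cons, reduceIte]
      have hcast : ((n : Int) + 1) = ((n + 1 : Nat) : Int) := by push_cast; ring
      rw [hcast, ih _ (n + 1) (by omega)]
      have hdrop : idx.drop n = idx[n] :: idx.drop (n + 1) :=
        (List.drop_eq_getElem_cons hn)
      have hget : PySem.List.pyGetD idx (n : Int) 0 = idx[n] := by
        rw [PySem.List.pyGetD_natCast]
        simp [List.getD, hn]
      cases hps : pvSplitStar cs with
      | nil => exact absurd hps (pvSplitStar_ne_nil cs)
      | cons p ps =>
        simp only [pvSplitStar, reduceIte, hps, hdrop, hget, pvInter, List.count_cons_self,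
          Prod.mk.injEq]
        refine ⟨by simp, by push_cast; ring⟩
    · simp only [List.foldl_cons, if_neg hc]
      rw [ih _ n (by simpa [List.count_cons, hc] using h)]
      cases hps : pvSplitStar cs with
      | nil => exact absurd hps (pvSplitStar_ne_nil cs)
      | cons p ps =>
        simp only [pvSplitStar, if_neg hc, hps]
        cases ps with
        | nil =>
          cases hd : idx.drop n <;> simp [pvInter, hc]
        | cons q qs =>
          cases hd : idx.drop n <;> simp [pvInter, hc]

theorem pv_coreA (smiles : String) (idx : List Int)
    (h : smiles.toList.count '*' ≤ idx.length) :
    get_smiles_val_core smiles idx =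
      String.ofList (pvInter (pvSplitStar smiles.toList) idx) := by
  unfold get_smiles_val_core
  have := pv_coreA_fold idx smiles.toList [] 0 (by simpa using h)
  simp only [Nat.cast_zero] at this
  rw [this]
  simp

-- B's pieces loop + join computes the same interleaving
theorem pv_inter_flat (p0 : List Char) (rest : List (List Char)) (ks : List Int)
    (h : ks.length = rest.length) :
    pvInter (p0 :: rest) ks =
      p0 ++ (ks.zip rest).flatMap (fun kp => pvBrk kp.1 ++ kp.2) := by
  induction rest generalizing p0 ks with
  | nil =>
    have : ks = [] := List.eq_nil_of_length_eq_zero (by simpa using h)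
    subst this; simp [pvInter]
  | cons p1 rest ih =>
    cases ks with
    | nil => simp at h
    | cons k ks =>
      simp only [List.length_cons] at h
      simp only [pvInter, List.zip_cons_cons, List.flatMap_cons]
      rw [ih p1 ks (by omega)]
      simp

theorem pv_flatten_intersperse (ps : List (List Char)) :
    (List.intersperse ([] : List Char) ps).flatten = ps.flatten := by
  induction ps with
  | nil => simp
  | cons p ps ih =>
    cases ps with
    | nil => simp
    | cons q qs => simp [List.intersperse] at ih ⊢; simp [ih]

theorem pv_join_flatten (parts : List (List Char)) :
    PySem.Str.join "" (parts.map String.ofList) = String.ofList parts.flatten := by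
  simp only [PySem.Str.join, PySem.Chars.join]
  congr 1
  have hmap : (parts.map String.ofList).map String.toList = parts := by
    simp [List.map_map, Function.comp_def]
  rw [hmap]
  simp only [List.intercalate, String.toList_empty]
  exact pv_flatten_intersperse parts

theorem pv_flat2 (zs : List (Int × List Char)) :
    (zs.flatMap (fun kp => [pvBrk kp.1, kp.2])).flatten =
      zs.flatMap (fun kp => pvBrk kp.1 ++ kp.2) := by
  induction zs with
  | nil => simp
  | cons z zs ih => simp [ih]

-- str.replace '*' new = join the split pieces with new
def pvRepStar (cs new : List Char) : List Char :=
  match cs with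
  | [] => []
  | c :: cs => if c = '*' then new ++ pvRepStar cs new else c :: pvRepStar cs new

theorem pv_replace_go (new : List Char) (fuel : Nat) (l acc : List Char) (h : l.length ≤ fuel) :
    PySem.Chars.replace.go ['*'] new fuel l acc = acc.reverse ++ pvRepStar l new := by
  induction fuel generalizing l acc with
  | zero =>
    have : l = [] := List.eq_nil_of_length_eq_zero (Nat.le_zero.mp h)
    subst this; simp [PySem.Chars.replace.go, pvRepStar]
  | succ fuel ih =>
    cases l with
    | nil => simp [PySem.Chars.replace.go, pvRepStar]
    | cons c rest =>
      simp only [PySem.Chars.replace.go]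
      by_cases hc : c = '*'
      · subst hc
        rw [if_pos (by simp [List.isPrefixOf])]
        simp only [List.length_cons] at h
        simp only [List.length_cons, List.length_nil, List.drop_succ_cons, List.drop_zero]
        rw [ih rest (new.reverse ++ acc) (by omega)]
        simp [pvRepStar]
      · rw [if_neg (by simp [List.isPrefixOf]; intro hh; exact hc hh.symm)]
        simp only [List.length_cons] at h
        rw [ih rest (c :: acc) (by omega)]
        simp [pvRepStar, hc]

theorem pv_repStar_join (cs new : List Char) :
    pvRepStar cs new = pvJoinWith (pvSplitStar cs) new := by
  induction cs with
  | nil => simp [pvRepStar, pvSplitStar, pvJoinWith]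
  | cons c cs ih =>
    by_cases hc : c = '*'
    · subst hc
      cases hps : pvSplitStar cs with
      | nil => exact absurd hps (pvSplitStar_ne_nil cs)
      | cons p ps =>
        simp only [pvRepStar, pvSplitStar, reduceIte, hps] at ih ⊢
        simp [pvJoinWith, ih]
    · cases hps : pvSplitStar cs with
      | nil => exact absurd hps (pvSplitStar_ne_nil cs)
      | cons p ps =>
        simp only [pvRepStar, pvSplitStar, if_neg hc, hps] at ih ⊢
        cases ps with
        | nil => simp [pvJoinWith, ih]
        | cons q qs => simp [pvJoinWith] at ih ⊢; simp [ih]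

theorem pv_replace_star (s : String) :
    PySem.Str.replace s "*" "[1*]" =
      String.ofList (pvJoinWith (pvSplitStar s.toList) "[1*]".toList) := by
  have h1 : (PySem.Str.replace s "*" "[1*]").toList
      = pvJoinWith (pvSplitStar s.toList) "[1*]".toList := by
    rw [PySem.Str.toList_replace]
    show PySem.Chars.replace s.toList ['*'] "[1*]".toList = _
    simp only [PySem.Chars.replace]
    rw [if_neg (by simp)]
    rw [pv_replace_go "[1*]".toList s.toList.length s.toList [] (le_refl _)]
    simp [pv_repStar_join]
  calc PySem.Str.replace s "*" "[1*]"
      = String.ofList (PySem.Str.replace s "*" "[1*]").toList := String.ofList_toList.symm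
    _ = _ := by rw [h1]

-- length of an element of permutations(range, r) with r = range length
theorem pv_perm_length {xs idx : List Int}
    (h : idx ∈ PySem.List.permutations xs xs.length) : idx.length = xs.length :=
  (PySem.List.perm_of_mem_permutations h).length_eq

-- ===== VERDICT (by name: the statement is the Claim_ definition above) =====
theorem get_smiles_val_spec : Claim_equal_get_smiles_val := by
  unfold Claim_equal_get_smiles_val
  intro smiles _
  unfold Spec_get_smiles_val get_smiles_val get_smiles_val_alt
  have hcount := pv_count_star smiles
  have hsplit := pv_splitOn_star smiles.toList
  have hlen := pvSplitStar_length smiles.toList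
  set cs := smiles.toList with hcs
  set w := cs.count '*' with hw
  have hrng : (PySem.List.pyRange 1 ((w : Int) + 1) 1).length = w := by
    rw [PySem.List.length_pyRange_one]; omega
  simp only [hcount, hsplit, List.length_map, hlen, Nat.add_sub_cancel]
  by_cases h1 : w = 1
  · -- single-star branch: one permutation [[1]], replace '*' by "[1*]"
    simp only [h1, beq_self_eq_true, if_true]
    obtain ⟨p0, p1, hps⟩ := List.length_eq_two.mp (by omega : (pvSplitStar cs).length = 2)
    have hperm : PySem.List.permutations
        (PySem.List.pyRange 1 (((1 : Nat) : Int) + 1) 1)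
        (PySem.List.pyRange 1 (((1 : Nat) : Int) + 1) 1).length = [[1]] := by decide
    rw [hperm, pv_replace_star, hps]
    simp only [List.foldl_cons, List.foldl_nil, List.map_cons, List.map_nil, List.headD_cons,
      List.tail_cons, List.zip_cons_cons, List.zip_nil_right, List.nil_append]
    have hbrk : "[1*]".toList = pvBrk 1 := by decide
    rw [show [String.ofList p0] ++ [String.ofList (pvBrk 1), String.ofList p1]
        = [p0, pvBrk 1, p1].map String.ofList from by simp,
      pv_join_flatten]
    simp [pvJoinWith, hbrk]
  · -- general branch: same permutation list, elementwise equality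
    have hbe : (w == 1) = false := by simpa using h1
    simp only [hbe, Bool.false_eq_true, if_false]
    have hP : PySem.List.permutations (PySem.List.pyRange 1 ((w : Int) + 1) 1)
        (PySem.List.pyRange 1 ((w : Int) + 1) 1).length
        = PySem.List.permutations (PySem.List.pyRange 1 ((w : Int) + 1) 1) w := by rw [hrng]
    rw [hP.symm]
    rw [PySem.List.foldl_append_singleton_eq_map, PySem.List.foldl_append_singleton_eq_map]
    simp only [List.nil_append]
    apply List.map_congr_left
    intro idx hidx
    have hlenidx : idx.length = w := by
      have := pv_perm_length hidx
      rw [hrng] at this; exact this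
    -- A's element
    rw [pv_coreA smiles idx (by rw [← hcs, ← hw, hlenidx])]
    -- B's element
    cases hps : pvSplitStar cs with
    | nil => exact absurd hps (pvSplitStar_ne_nil cs)
    | cons p0 rest =>
      have hrest : rest.length = w := by
        have := hlen; rw [hps] at this; simp at this; omega
      simp only [List.map_cons, List.headD_cons, List.tail_cons]
      rw [PySem.List.foldl_append_eq_flatMap
        (g := fun kp : Int × String => [String.ofList (pvBrk kp.1), kp.2])]
      rw [List.zip_map_right]
      have hfm : (List.map (Prod.map id String.ofList) (idx.zip rest)).flatMap
          (fun kp : Int × String => [String.ofList (pvBrk kp.1), kp.2])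
          = ((idx.zip rest).flatMap (fun kp => [pvBrk kp.1, kp.2])).map String.ofList := by
        induction idx.zip rest with
        | nil => simp
        | cons z zs ih => simp [ih]
      rw [hfm]
      simp only [List.singleton_append]
      rw [show String.ofList p0 :: ((idx.zip rest).flatMap
            (fun kp => [pvBrk kp.1, kp.2])).map String.ofList
          = (p0 :: (idx.zip rest).flatMap (fun kp => [pvBrk kp.1, kp.2])).map String.ofList
        from by simp]
      rw [pv_join_flatten]
      congr 1
      rw [pv_inter_flat p0 rest idx (by omega)]
      simp [pv_flat2]
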